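-- pv_equiv track=rewrite | github.com/kamahen/line-break | line_adjust.py | distribute_spaces
-- ===== SOURCE A (Python) =====
-- def distribute_spaces(words, max_width, left_to_right):
--     """words: list of words in line
--     left_to_right: which direction to add blanks
--     Returns: list of lines with blanks inserted
--     """
--
--     if len(words) <= 1:
--         return ' '.join(words)
--
--     # TODO: make this more functional
--     to_distribute = max_width - len(' '.join(words))
--
--     if left_to_right:
--         i_range = lambda: range(0, len(words) - 1)
--         pad_word = lambda w: w + ' '
--     else:
--         i_range = lambda: range(len(words) - 1, 0, -1)
--         pad_word = lambda w: ' ' + w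
--
--     padded_words = words[:]
--     while to_distribute > 0:
--         for i in i_range():
--             padded_words[i] = pad_word(padded_words[i])
--             to_distribute -= 1
--             if to_distribute <= 0:
--                 break
--     return ' '.join(padded_words)
-- ===== SOURCE B (Python) =====
-- def distribute_spaces(words, max_width, left_to_right):
--     """words: list of words in line
--     left_to_right: which direction to add blanks
--     Returns: list of lines with blanks inserted
--     """
--     if len(words) <= 1:
--         return ' '.join(words)
--     n = len(words)
--     extra = max_width - len(' '.join(words))
--     if extra <= 0:
--         return ' '.join(words)
--     q, r = divmod(extra, n - 1)
--     if left_to_right: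
--         padded = [w + ' ' * (q + (1 if i < r else 0))
--                   for i, w in enumerate(words[:-1])] + [words[-1]]
--     else:
--         padded = [words[0]] + [' ' * (q + (1 if n - 1 - i < r else 0)) + w
--                                for i, w in enumerate(words[1:], start=1)]
--     return ' '.join(padded)
-- ===== Notes on version B (the rewrite author's own statement) =====
-- stated objective: alternative
-- what changed: A distributes the extra spaces one at a time with a while loop of repeated passes over the gaps; B computes each gap's share in closed form with divmod (quotient for every gap, one more for the first remainder-many gaps in pass order) and builds the line in a single pass.
import Mathlib
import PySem

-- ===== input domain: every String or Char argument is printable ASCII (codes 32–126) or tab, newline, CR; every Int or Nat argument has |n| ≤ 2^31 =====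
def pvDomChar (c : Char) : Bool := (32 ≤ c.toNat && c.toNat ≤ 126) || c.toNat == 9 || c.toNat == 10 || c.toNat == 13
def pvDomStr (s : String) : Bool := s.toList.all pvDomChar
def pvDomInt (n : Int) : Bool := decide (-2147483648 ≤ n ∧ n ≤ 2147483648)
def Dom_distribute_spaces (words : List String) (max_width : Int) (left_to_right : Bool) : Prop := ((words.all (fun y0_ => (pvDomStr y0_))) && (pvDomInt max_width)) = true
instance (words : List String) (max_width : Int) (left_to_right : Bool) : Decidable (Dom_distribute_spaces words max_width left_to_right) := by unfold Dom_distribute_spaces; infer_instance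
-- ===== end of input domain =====

-- B replaces A's one-space-at-a-time round-robin padding loop by a closed-form divmod computation of the extra spaces per gap (alternative algorithm).


-- ===== PORT A =====
-- pad_word (one lambda per direction)
def dsPad (ltr : Bool) (w : String) : String := if ltr then w ++ " " else " " ++ w

-- i_range(): range(0, len(words)-1) resp. range(len(words)-1, 0, -1)
def dsIdxs (ltr : Bool) (n : Int) : List Int :=
  if ltr then PySem.List.pyRange 0 (n - 1) 1 else PySem.List.pyRange (n - 1) 0 (-1)

-- padded_words[i] = pad_word(padded_words[i])  (i is always in range when reached)
def dsPadAt (ltr : Bool) (acc : List String) (i : Int) : List String :=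
  PySem.List.pySetD acc i (dsPad ltr (PySem.List.pyGetD acc i ""))

-- the inner 'for i in i_range(): … ; if to_distribute <= 0: break'
def dsInner (ltr : Bool) : List Int → List String × Int → List String × Int
  | [], st => st
  | i :: rest, (pw, td) =>
    let pw' := dsPadAt ltr pw i
    let td' := td - 1
    if td' ≤ 0 then (pw', td') else dsInner ltr rest (pw', td')

-- the inner loop strictly decreases to_distribute (used for dsOuter's termination)
theorem dsInner_snd_le (ltr : Bool) : ∀ (idxs : List Int) (pw : List String) (td : Int),
    (dsInner ltr idxs (pw, td)).2 ≤ td := by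
  intro idxs
  induction idxs with
  | nil => intro pw td; simp [dsInner]
  | cons i rest ih =>
    intro pw td
    simp only [dsInner]
    split
    · simp
    · exact le_trans (ih _ _) (by omega)

theorem dsInner_snd_lt (ltr : Bool) (idxs : List Int) (h : idxs ≠ []) (pw : List String)
    (td : Int) : (dsInner ltr idxs (pw, td)).2 < td := by
  cases idxs with
  | nil => exact absurd rfl h
  | cons i rest =>
    simp only [dsInner]
    split
    · simp
    · exact lt_of_le_of_lt (dsInner_snd_le ltr _ _ _) (by omega)

-- the outer 'while to_distribute > 0' loop; the 'dsIdxs … ≠ []' conjunct is only a totality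
-- guard (the caller always passes n ≥ 2, so the index range is nonempty, exactly as in Python)
def dsOuter (ltr : Bool) (n : Int) (pw : List String) (td : Int) : List String :=
  if h : 0 < td ∧ dsIdxs ltr n ≠ [] then
    let st := dsInner ltr (dsIdxs ltr n) (pw, td)
    dsOuter ltr n st.1 st.2
  else pw
termination_by td.toNat
decreasing_by
  have := dsInner_snd_lt ltr (dsIdxs ltr n) h.2 pw td
  omega

def distribute_spaces (words : List String) (max_width : Int) (left_to_right : Bool) : String :=
  if (words.length : Int) ≤ 1 then PySem.Str.join " " words
  else
    let td := max_width - PySem.Str.len (PySem.Str.join " " words)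
    PySem.Str.join " " (dsOuter left_to_right (words.length : Int) words td)

-- ===== PORT B =====
-- ' ' * k
def dsSpaces (k : Int) : String := String.ofList (List.replicate k.toNat ' ')

def distribute_spaces_alt (words : List String) (max_width : Int) (left_to_right : Bool) : String :=
  if (words.length : Int) ≤ 1 then PySem.Str.join " " words
  else
    let n : Int := (words.length : Int)
    let extra := max_width - PySem.Str.len (PySem.Str.join " " words)
    if extra ≤ 0 then PySem.Str.join " " words
    else
      let q := PySem.Int.floordiv extra (n - 1)
      let r := PySem.Int.mod extra (n - 1)
      let padded : List String :=
        if left_to_right then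
          (PySem.List.enumerate (PySem.List.slice words none (some (-1))) 0).map
            (fun p => p.2 ++ dsSpaces (q + (if p.1 < r then 1 else 0))) ++
          [PySem.List.pyGetD words (-1) ""]
        else
          [PySem.List.pyGetD words 0 ""] ++
          (PySem.List.enumerate (PySem.List.slice words (some 1) none) 1).map
            (fun p => dsSpaces (q + (if n - 1 - p.1 < r then 1 else 0)) ++ p.2)
      PySem.Str.join " " padded

-- ===== PRECONDITION & SPEC =====
def Spec_distribute_spaces (words : List String) (max_width : Int) (left_to_right : Bool) (out : String) : Prop := out = distribute_spaces_alt words max_width left_to_right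
instance (words : List String) (max_width : Int) (left_to_right : Bool) (out : String) : Decidable (Spec_distribute_spaces words max_width left_to_right out) := by unfold Spec_distribute_spaces; infer_instance

-- ===== CLAIM (what is proved, stated in full; the proofs are below) =====
def Claim_equal_distribute_spaces : Prop := ∀ (words : List String) (max_width : Int) (left_to_right : Bool), Dom_distribute_spaces words max_width left_to_right → Spec_distribute_spaces words max_width left_to_right (distribute_spaces words max_width left_to_right)

-- ===== LEMMAS AND PROOFS =====
-- round-robin order position of word index j (j is a padded gap iff 0 ≤ pos < n-1)
def dsPos (ltr : Bool) (n : Int) (j : Nat) : Int := if ltr then (j : Int) else n - 1 - (j : Int)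

-- total number of pads word j receives when td extra spaces are distributed over n words
def dsCnt (ltr : Bool) (n td : Int) (j : Nat) : Nat :=
  if 0 < td ∧ 0 ≤ dsPos ltr n j ∧ dsPos ltr n j < n - 1 then
    (PySem.Int.floordiv td (n - 1) + if dsPos ltr n j < PySem.Int.mod td (n - 1) then 1 else 0).toNat
  else 0

theorem dsCnt_eq (ltr : Bool) (n : Int) (hn : 2 ≤ n) (t : Int) (j : Nat) :
    dsCnt ltr n t j =
      if 0 < t ∧ 0 ≤ dsPos ltr n j ∧ dsPos ltr n j < n - 1 then
        (t / (n - 1) + if dsPos ltr n j < t % (n - 1) then 1 else 0).toNat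
      else 0 := by
  rw [dsCnt, PySem.Int.floordiv_eq_ediv_of_pos (by omega), PySem.Int.mod_eq_emod_of_pos (by omega)]

theorem dsCnt_rec (ltr : Bool) (n : Int) (hn : 2 ≤ n) (td : Int) (htd : 0 < td) (j : Nat) :
    dsCnt ltr n td j =
      (if 0 ≤ dsPos ltr n j ∧ dsPos ltr n j < min td (n - 1) then 1 else 0) +
        dsCnt ltr n (td - min td (n - 1)) j := by
  rw [dsCnt_eq ltr n hn, dsCnt_eq ltr n hn]
  set g : Int := n - 1 with hg
  have hg1 : 1 ≤ g := by omega
  set p : Int := dsPos ltr n j with hp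
  have hR0 : 0 ≤ td % g := Int.emod_nonneg td (by omega)
  have hRg : td % g < g := Int.emod_lt_of_pos td (by omega)
  by_cases hlt : td < g
  · have hm : min td g = td := by omega
    have hdiv : td / g = 0 := Int.ediv_eq_zero_of_lt (by omega) hlt
    have hmod : td % g = td := Int.emod_eq_of_lt (by omega) hlt
    rw [hm, hdiv, hmod]
    split_ifs <;> omega
  · have hm : min td g = g := by omega
    have hQ : 1 ≤ td / g := Int.le_ediv_iff_mul_le (by omega) |>.mpr (by omega)
    have hdiv : (td - g) / g = td / g - 1 := by
      rw [show td - g = td + -1 * g by ring, Int.add_mul_ediv_right _ _ (by omega : g ≠ 0)]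
      ring
    have hmod : (td - g) % g = td % g := Int.sub_emod_right td g
    have hmod0 : td = g → td % g = 0 := by intro h; rw [h]; simp
    have hdiv0 : td = g → td / g = 1 := by intro h; rw [h]; exact Int.ediv_self (by omega)
    rw [hm, hdiv, hmod]
    split_ifs <;> omega

theorem dsInner_eq (ltr : Bool) : ∀ (idxs : List Int) (pw : List String) (td : Int), 0 < td →
    dsInner ltr idxs (pw, td) =
      ((idxs.take (min td.toNat idxs.length)).foldl (dsPadAt ltr) pw,
        td - ((min td.toNat idxs.length : Nat) : Int)) := by
  intro idxs
  induction idxs with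
  | nil => intro pw td htd; simp [dsInner]
  | cons i rest ih =>
    intro pw td htd
    simp only [dsInner]
    split
    · -- td - 1 ≤ 0, so td = 1
      have h1 : td = 1 := by omega
      subst h1
      simp [List.take_succ_cons]
    · rename_i hgt
      have htd2 : 2 ≤ td := by omega
      rw [ih _ (td - 1) (by omega)]
      have hm : min td.toNat (i :: rest).length = min (td - 1).toNat rest.length + 1 := by
        simp only [List.length_cons]; omega
      rw [hm]
      simp only [List.take_succ_cons, List.foldl_cons]
      simp only [Prod.mk.injEq, true_and]
      push_cast; ring

theorem dsFold_len (ltr : Bool) : ∀ (is : List Int) (pw : List String),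
    (is.foldl (dsPadAt ltr) pw).length = pw.length := by
  intro is
  induction is with
  | nil => intro pw; rfl
  | cons i rest ih =>
    intro pw
    simp only [List.foldl_cons]
    rw [ih]
    simp [dsPadAt, PySem.List.length_pySetD]

theorem dsFold_get (ltr : Bool) : ∀ (is : List Int) (pw : List String),
    (∀ i ∈ is, 0 ≤ i ∧ i.toNat < pw.length) → is.Nodup →
    ∀ j (hj : j < pw.length),
      (is.foldl (dsPadAt ltr) pw)[j]'(by rw [dsFold_len]; exact hj) =
        if (j : Int) ∈ is then dsPad ltr (pw[j]) else pw[j] := by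
  intro is
  induction is with
  | nil => intro pw _ _ j hj; simp
  | cons i rest ih =>
    intro pw hrange hnd j hj
    simp only [List.foldl_cons]
    have hi := hrange i (by simp)
    have hpw' : dsPadAt ltr pw i = pw.set i.toNat (dsPad ltr (pw[i.toNat]'hi.2)) := by
      unfold dsPadAt
      rw [PySem.List.pySetD_of_nonneg pw _ hi.1, PySem.List.pyGetD_of_nonneg pw _ hi.1,
        List.getD_eq_getElem pw "" hi.2]
    have hlen' : (dsPadAt ltr pw i).length = pw.length := by
      rw [hpw']; simp
    rw [ih (dsPadAt ltr pw i)
        (fun x hx => by rw [hlen']; exact hrange x (List.mem_cons_of_mem _ hx))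
        (List.Nodup.of_cons hnd) j (by rw [hlen']; exact hj)]
    by_cases hjr : (j : Int) ∈ rest
    · have hne : (j : Int) ≠ i := fun h => (List.nodup_cons.mp hnd).1 (h ▸ hjr)
      have hne' : i.toNat ≠ j := by omega
      simp [hjr, hpw', hne']
    · by_cases hji : (j : Int) = i
      · have heq : i.toNat = j := by omega
        simp [hji, hpw', heq, (hji ▸ hjr : i ∉ rest)]
      · have : i.toNat ≠ j := by omega
        simp [hjr, hji, hpw', this]

theorem dsPad_iter (ltr : Bool) (k : Nat) (w : String) :
    (dsPad ltr)^[k] w = if ltr then w ++ dsSpaces (k : Int) else dsSpaces (k : Int) ++ w := by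
  induction k with
  | zero =>
    apply String.toList_inj.mp
    cases ltr <;> simp [dsSpaces]
  | succ k ih =>
    rw [Function.iterate_succ_apply', ih]
    apply String.toList_inj.mp
    cases ltr
    · simp [dsPad, dsSpaces, List.replicate_succ]
    · simp [dsPad, dsSpaces, List.replicate_succ', List.append_assoc]

theorem dsInner_fst_len (ltr : Bool) : ∀ (idxs : List Int) (pw : List String) (td : Int),
    (dsInner ltr idxs (pw, td)).1.length = pw.length := by
  intro idxs
  induction idxs with
  | nil => intro pw td; rfl
  | cons i rest ih =>
    intro pw td
    simp only [dsInner]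
    split
    · simp [dsPadAt, PySem.List.length_pySetD]
    · rw [ih]; simp [dsPadAt, PySem.List.length_pySetD]

theorem dsOuter_len (ltr : Bool) (n : Int) : ∀ (k : Nat) (td : Int) (pw : List String),
    td.toNat ≤ k → (dsOuter ltr n pw td).length = pw.length := by
  intro k
  induction k with
  | zero =>
    intro td pw hk
    rw [dsOuter, dif_neg (by omega : ¬(0 < td ∧ dsIdxs ltr n ≠ []))]
  | succ k ih =>
    intro td pw hk
    rw [dsOuter]
    by_cases h : 0 < td ∧ dsIdxs ltr n ≠ []
    · rw [dif_pos h]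
      have hlt := dsInner_snd_lt ltr (dsIdxs ltr n) h.2 pw td
      rw [ih _ _ (by omega), dsInner_fst_len]
    · rw [dif_neg h]

theorem dsIdxs_len (ltr : Bool) (n : Int) : (dsIdxs ltr n).length = (n - 1).toNat := by
  cases ltr <;> simp [dsIdxs, PySem.List.length_pyRange_one, PySem.List.length_pyRange_neg_one]

theorem dsIdxs_ne_nil (ltr : Bool) (n : Int) (hn : 2 ≤ n) : dsIdxs ltr n ≠ [] := by
  intro h
  have := dsIdxs_len ltr n
  rw [h] at this
  simp at this
  omega

theorem dsIdxs_nodup (ltr : Bool) (n : Int) : (dsIdxs ltr n).Nodup := by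
  cases ltr
  · rw [dsIdxs, if_neg (by simp), PySem.List.pyRange_neg_one_eq_reverse, List.nodup_reverse]
    exact PySem.List.nodup_pyRange_one _ _
  · rw [dsIdxs, if_pos rfl]
    exact PySem.List.nodup_pyRange_one _ _

theorem dsIdxs_mem_range (ltr : Bool) (n : Int) (i : Int) (h : i ∈ dsIdxs ltr n) :
    0 ≤ i ∧ i < n := by
  cases ltr
  · rw [dsIdxs, if_neg (by simp), PySem.List.mem_pyRange_neg_one] at h
    omega
  · rw [dsIdxs, if_pos rfl, PySem.List.mem_pyRange_one] at h
    omega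

theorem dsIdxs_take_mem (ltr : Bool) (n : Int) (m : Nat)
    (hm : m ≤ (n - 1).toNat) (j : Nat) :
    ((j : Int) ∈ (dsIdxs ltr n).take m) ↔
      (0 ≤ dsPos ltr n j ∧ dsPos ltr n j < (m : Int)) := by
  cases ltr
  · rw [dsIdxs, if_neg (by simp), PySem.List.pyRange_neg_one, ← List.map_take, List.take_range]
    rw [show dsPos false n j = n - 1 - (j : Int) from rfl]
    simp only [List.mem_map, List.mem_range, sub_zero]
    constructor
    · rintro ⟨a, ha, hae⟩
      constructor <;> omega
    · rintro ⟨h0, h1⟩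
      refine ⟨(n - 1 - (j : Int)).toNat, by omega, by omega⟩
  · rw [dsIdxs, if_pos rfl, PySem.List.pyRange_one, ← List.map_take, List.take_range]
    rw [show dsPos true n j = (j : Int) from rfl]
    simp only [List.mem_map, List.mem_range, sub_zero]
    constructor
    · rintro ⟨a, ha, hae⟩
      constructor <;> omega
    · rintro ⟨h0, h1⟩
      exact ⟨j, by omega, by omega⟩

theorem dsOuter_get (ltr : Bool) (n : Int) (hn : 2 ≤ n) : ∀ (k : Nat) (td : Int)
    (pw : List String), td.toNat ≤ k → pw.length = n.toNat → ∀ j (hj : j < pw.length),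
    (dsOuter ltr n pw td)[j]'(by rw [dsOuter_len ltr n td.toNat td pw le_rfl]; exact hj) =
      (dsPad ltr)^[dsCnt ltr n td j] (pw[j]) := by
  intro k
  induction k with
  | zero =>
    intro td pw hk hlen j hj
    have hcnt : dsCnt ltr n td j = 0 := by rw [dsCnt, if_neg (by omega)]
    rw [hcnt]
    simp only [Function.iterate_zero, id]
    have : dsOuter ltr n pw td = pw := by
      rw [dsOuter, dif_neg (by omega : ¬(0 < td ∧ dsIdxs ltr n ≠ []))]
    simp only [this]
  | succ k ih =>
    intro td pw hk hlen j hj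
    by_cases hpos : 0 < td
    case neg =>
      have hcnt : dsCnt ltr n td j = 0 := by rw [dsCnt, if_neg (by omega)]
      rw [hcnt]
      simp only [Function.iterate_zero, id]
      have : dsOuter ltr n pw td = pw := by
        rw [dsOuter, dif_neg (by omega : ¬(0 < td ∧ dsIdxs ltr n ≠ []))]
      simp only [this]
    case pos =>
    have hne := dsIdxs_ne_nil ltr n hn
    have hIlen : (dsIdxs ltr n).length = (n - 1).toNat := dsIdxs_len ltr n
    -- the state after one pass
    set mN : Nat := min td.toNat (dsIdxs ltr n).length with hmN
    have hm1 : 1 ≤ mN := by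
      have : 1 ≤ (dsIdxs ltr n).length := by
        cases h : dsIdxs ltr n with
        | nil => exact absurd h hne
        | cons a b => simp
      omega
    have hinner := dsInner_eq ltr (dsIdxs ltr n) pw td hpos
    have houter : dsOuter ltr n pw td =
        dsOuter ltr n ((dsIdxs ltr n).take mN |>.foldl (dsPadAt ltr) pw) (td - (mN : Int)) := by
      rw [dsOuter, dif_pos ⟨hpos, hne⟩]
      simp only [hinner]
      rfl
    set pw' : List String := (dsIdxs ltr n).take mN |>.foldl (dsPadAt ltr) pw with hpw'
    have hlen' : pw'.length = pw.length := dsFold_len ltr _ pw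
    have htake_range : ∀ i ∈ (dsIdxs ltr n).take mN, 0 ≤ i ∧ i.toNat < pw.length := by
      intro i hi
      have := dsIdxs_mem_range ltr n i (List.mem_of_mem_take hi)
      constructor
      · exact this.1
      · omega
    have htake_nodup : ((dsIdxs ltr n).take mN).Nodup :=
      (List.take_sublist _ _).nodup (dsIdxs_nodup ltr n)
    have hget' : ∀ (hj' : j < pw.length), pw'[j]'(by rw [hlen']; exact hj') =
        if (j : Int) ∈ (dsIdxs ltr n).take mN then dsPad ltr (pw[j]) else pw[j] :=
      fun hj' => dsFold_get ltr _ pw htake_range htake_nodup j hj'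
    -- apply the induction hypothesis at td - mN
    have hrec := ih (td - (mN : Int)) pw' (by omega) (by rw [hlen', hlen]) j (by rw [hlen']; exact hj)
    have hcast : ((mN : Nat) : Int) = min td (n - 1) := by
      simp only [hmN, hIlen]; omega
    have hmem : ((j : Int) ∈ (dsIdxs ltr n).take mN) ↔
        (0 ≤ dsPos ltr n j ∧ dsPos ltr n j < min td (n - 1)) := by
      rw [dsIdxs_take_mem ltr n mN (by omega) j, hcast]
    have hcnt := dsCnt_rec ltr n hn td hpos j
    rw [hcast] at hrec
    -- rewrite the outer call and chain
    simp only [houter, hcast]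
    rw [hrec, hget' hj]
    by_cases hin : (j : Int) ∈ (dsIdxs ltr n).take mN
    · rw [if_pos hin, hcnt, if_pos (hmem.mp hin)]
      rw [← Function.iterate_succ_apply]
      congr 1
      omega
    · rw [if_neg hin, hcnt, if_neg (fun hc => hin (hmem.mpr hc))]
      simp

theorem dsMain (words : List String) (max_width : Int) (left_to_right : Bool) :
    distribute_spaces words max_width left_to_right =
      distribute_spaces_alt words max_width left_to_right := by
  by_cases h1 : (words.length : Int) ≤ 1
  · rw [distribute_spaces, distribute_spaces_alt, if_pos h1, if_pos h1]
  · simp only [distribute_spaces, distribute_spaces_alt, if_neg h1]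
    have hn : 2 ≤ (words.length : Int) := by omega
    set n : Int := (words.length : Int) with hdefn
    set extra : Int := max_width - PySem.Str.len (PySem.Str.join " " words) with hdefe
    by_cases h2 : extra ≤ 0
    · rw [if_pos h2]
      congr 1
      rw [dsOuter, dif_neg (by omega : ¬(0 < extra ∧ dsIdxs left_to_right n ≠ []))]
    · rw [if_neg h2]
      have hpos : 0 < extra := by omega
      congr 1
      set q : Int := PySem.Int.floordiv extra (n - 1) with hdefq
      set r : Int := PySem.Int.mod extra (n - 1) with hdefr
      have hq : q = extra / (n - 1) := PySem.Int.floordiv_eq_ediv_of_pos (by omega)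
      have hr : r = extra % (n - 1) := PySem.Int.mod_eq_emod_of_pos (by omega)
      have hq0 : 0 ≤ q := by rw [hq]; exact Int.ediv_nonneg (by omega) (by omega)
      have hlenw : words.length = n.toNat := by omega
      -- A-side elements
      have hA := dsOuter_get left_to_right n hn extra.toNat extra words le_rfl hlenw
      have hAlen : (dsOuter left_to_right n words extra).length = words.length :=
        dsOuter_len left_to_right n extra.toNat extra words le_rfl
      -- list equality, elementwise
      cases left_to_right
      · -- right to left
        simp only [Bool.false_eq_true, if_false]
        apply List.ext_getElem
        · simp [hAlen, PySem.List.length_enumerate, PySem.List.slice_from_one]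
          omega
        · intro j hja hjb
          have hjn : j < words.length := by omega
          rw [hA j hjn]
          rcases Nat.eq_zero_or_pos j with hj0 | hj1
          · subst hj0
            have hcnt : dsCnt false n extra 0 = 0 := by
              rw [dsCnt, if_neg]
              rw [show dsPos false n 0 = n - 1 from by simp [dsPos]]
              omega
            rw [hcnt]
            simp only [Function.iterate_zero, id]
            rw [List.getElem_append_left (by simp)]
            simp only [List.getElem_singleton]
            rw [PySem.List.pyGetD_of_nonneg words _ (by omega), List.getD_eq_getElem words "" (by omega)]
            simp
          · have hcnt : dsCnt false n extra j =
                (q + if n - 1 - (j : Int) < r then 1 else 0).toNat := by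
              rw [dsCnt, if_pos]
              · rw [show dsPos false n j = n - 1 - (j : Int) from rfl, ← hdefq, ← hdefr]
              · rw [show dsPos false n j = n - 1 - (j : Int) from rfl]
                omega
            rw [hcnt, dsPad_iter]
            simp only [Bool.false_eq_true, if_false]
            rw [List.getElem_append_right (by simp; omega)]
            simp only [List.length_singleton, List.getElem_map]
            simp only [PySem.List.slice_from_one]
            rw [PySem.List.getElem_enumerate words.tail 1 (j - 1)
              (by simp [List.length_tail]; omega)]
            have htail : words.tail[j - 1]'(by simp [List.length_tail]; omega) = words[j]'hjn := by
              rw [List.getElem_tail]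
              congr 1
              omega
            have hidx : (1 : Int) + ((j - 1 : Nat) : Int) = (j : Int) := by omega
            simp only [htail, hidx]
            congr 2
            rw [Int.toNat_of_nonneg (by split_ifs <;> omega)]
      · -- left to right
        rw [if_pos rfl]
        apply List.ext_getElem
        · simp [hAlen, PySem.List.length_enumerate, PySem.List.slice_to_neg_one,
            List.length_dropLast]
          omega
        · intro j hja hjb
          have hjn : j < words.length := by omega
          rw [hA j hjn]
          by_cases hjlast : j < words.length - 1
          · have hcnt : dsCnt true n extra j = (q + if (j : Int) < r then 1 else 0).toNat := by
              rw [dsCnt, if_pos]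
              · rw [show dsPos true n j = (j : Int) from rfl, ← hdefq, ← hdefr]
              · rw [show dsPos true n j = (j : Int) from rfl]
                omega
            rw [hcnt, dsPad_iter]
            rw [if_pos rfl]
            rw [List.getElem_append_left
              (by simp [PySem.List.length_enumerate, PySem.List.slice_to_neg_one]; omega)]
            simp only [List.getElem_map, PySem.List.slice_to_neg_one]
            rw [PySem.List.getElem_enumerate words.dropLast 0 j
              (by simp [List.length_dropLast]; omega)]
            have hdl : words.dropLast[j]'(by simp [List.length_dropLast]; omega) =
                words[j]'hjn := List.getElem_dropLast _
            have hidx : (0 : Int) + (j : Int) = (j : Int) := by omega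
            simp only [hdl, hidx]
            congr 2
            rw [Int.toNat_of_nonneg (by split_ifs <;> omega)]
          · have hjeq : j = words.length - 1 := by omega
            have hcnt : dsCnt true n extra j = 0 := by
              rw [dsCnt, if_neg]
              rw [show dsPos true n j = (j : Int) from rfl]
              omega
            rw [hcnt]
            simp only [Function.iterate_zero, id]
            rw [List.getElem_append_right
              (by simp [PySem.List.length_enumerate, PySem.List.slice_to_neg_one]; omega)]
            simp only [PySem.List.length_enumerate, PySem.List.slice_to_neg_one,
              List.length_map, List.length_dropLast]
            rw [List.getElem_singleton]
            rw [PySem.List.pyGetD, PySem.List.pyGet?, PySem.List.pyIdx?]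
            rw [if_neg (by omega), if_pos (by omega)]
            simp only [Option.bind_some]
            rw [List.getElem?_eq_getElem (by omega)]
            simp only [Option.getD_some]
            congr 1

-- ===== VERDICT (by name: the statement is the Claim_ definition above) =====
theorem distribute_spaces_spec : Claim_equal_distribute_spaces := by
  intro words max_width left_to_right _
  unfold Spec_distribute_spaces
  exact dsMain words max_width left_to_right
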